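-- pv_equiv track=rewrite | github.com/nOOne-is-hier/TIS | Baekjoon/3687.성냥개비/3687.성냥개비6.py | find_min_case_dp
-- ===== SOURCE A (Python) =====
-- matchsticks = {0: 6, 1: 2, 2: 5, 3: 5, 4: 4, 5: 5, 6: 6, 7: 3, 8: 7, 9: 6}
--
-- def find_min_case_dp(n):
--     # DP 배열 초기화 (매우 큰 값으로 초기화)
--     dp = ["inf"] * (n + 1)
--     dp[0] = ""
--
--     # 최소값 DP 채우기
--     for i in range(2, n + 1):
--         for number, match_count in matchsticks.items():
--             if i - match_count >= 0:
--                 # 0은 제일 앞에 올 수 없으므로 예외 처리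
--                 if number == 0 and dp[i - match_count] == "":
--                     continue
--                 if dp[i - match_count] != "inf":
--                     candidate = dp[i - match_count] + str(number)
--                     if dp[i] == "inf" or int(candidate) < int(dp[i]):
--                         dp[i] = candidate
--
--     # DP[n] 값 반환
--     return dp[n]
-- ===== SOURCE B (Python) =====
-- def find_min_case_dp(n):
--     # Closed form: the minimum has ceil(n/7) digits; beyond a few small cases the
--     # answer is a fixed prefix (determined by n mod 7) followed by eights.
--     if n == 0:
--         return ""
--     if n == 1:
--         return "inf"
--     m, r = divmod(n, 7)
--     if r == 0:
--         return "8" * m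
--     if r == 1:
--         return "10" + "8" * (m - 1)
--     if r == 2:
--         return "1" + "8" * m
--     if r == 3:
--         if n == 3:
--             return "7"
--         if n == 10:
--             return "22"
--         return "200" + "8" * (m - 2)
--     if r == 4:
--         if n == 4:
--             return "4"
--         return "20" + "8" * (m - 1)
--     if r == 5:
--         return "2" + "8" * m
--     return "6" + "8" * m
-- ===== Notes on version B (the rewrite author's own statement) =====
-- stated objective: faster
-- what changed: A fills a DP table of decimal strings over all stick counts up to n with big-integer comparisons per cell; B returns the answer directly by a closed form: a fixed prefix chosen by the remainder of n modulo 7 (plus a handful of small special cases) followed by a run of eights.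
import Mathlib
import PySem

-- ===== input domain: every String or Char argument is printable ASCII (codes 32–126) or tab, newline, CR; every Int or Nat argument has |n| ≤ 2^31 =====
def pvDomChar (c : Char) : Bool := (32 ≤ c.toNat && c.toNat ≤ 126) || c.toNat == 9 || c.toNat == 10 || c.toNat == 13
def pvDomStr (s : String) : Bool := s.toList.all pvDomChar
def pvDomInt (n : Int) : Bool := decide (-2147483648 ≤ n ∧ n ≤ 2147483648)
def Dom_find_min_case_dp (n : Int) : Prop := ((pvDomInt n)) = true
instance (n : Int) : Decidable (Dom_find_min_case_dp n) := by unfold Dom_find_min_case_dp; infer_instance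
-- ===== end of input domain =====

-- B replaces A's quadratic big-integer DP by a closed form (a fixed prefix chosen by n mod 7,
-- then a run of eights); proved equal to A for every n ≥ 0 (A raises IndexError for n < 0).

-- ===== PORT A =====

-- Python str values are handled as List Char (PySem convention); "inf" is this literal.
def pvINF : List Char := ['i', 'n', 'f']

-- int(s) of "int(candidate) < int(dp[i])": every string this DP ever parses is a nonempty
-- pure-digit string (each parse is guarded by != "inf"; dp cells other than dp[0] = "" hold
-- digit strings the algorithm built, and dp[0] is never compared), and on nonempty digit
-- strings Python's int(s) is exactly this base-10 fold.
def pvDigitsVal (cs : List Char) : Int := cs.foldl (fun a c => 10 * a + ((c.toNat : Int) - 48)) 0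

def pvIntLt (a b : List Char) : Bool := decide (pvDigitsVal a < pvDigitsVal b)

-- matchsticks = {0: 6, 1: 2, ...}; .items() iterates in insertion order
def matchsticks : PySem.Dict Int Int :=
  PySem.Dict.ofList [(0, 6), (1, 2), (2, 5), (3, 5), (4, 4), (5, 5), (6, 6), (7, 3), (8, 7), (9, 6)]

-- body of the inner "for number, match_count in matchsticks.items():" loop
def stepA (i : Int) (dp : List (List Char)) (p : Int × Int) : List (List Char) :=
  if 0 ≤ i - p.2 then                                              -- if i - match_count >= 0:
    if p.1 = 0 ∧ PySem.List.pyGetD dp (i - p.2) [] = [] then dp    --   continue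
    else if PySem.List.pyGetD dp (i - p.2) [] ≠ pvINF then
      if PySem.List.pyGetD dp i [] = pvINF ∨
         pvIntLt (PySem.List.pyGetD dp (i - p.2) [] ++ PySem.Int.toChars p.1)
                 (PySem.List.pyGetD dp i []) = true then
        PySem.List.pySetD dp i (PySem.List.pyGetD dp (i - p.2) [] ++ PySem.Int.toChars p.1)
      else dp
    else dp
  else dp

def find_min_case_dp (n : Int) : String :=
  -- dp = ["inf"] * (n + 1); dp[0] = ""
  let dp0 := PySem.List.pySetD (PySem.List.pyRepeat [pvINF] (n + 1)) 0 []
  -- for i in range(2, n + 1): for number, match_count in matchsticks.items(): ...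
  let dp := (PySem.List.pyRange 2 (n + 1) 1).foldl
      (fun dp i => (PySem.Dict.items matchsticks).foldl (stepA i) dp) dp0
  -- return dp[n]   (index in range for every n ≥ 0)
  String.ofList (PySem.List.pyGetD dp n [])

-- ===== PORT B =====

-- the branch table of Source B on List Char; "8" * m is pyRepeat, n // 7 and n % 7 are floordiv / mod
def altChars (n : Int) : List Char :=
  if n = 0 then []
  else if n = 1 then ['i', 'n', 'f']
  else if PySem.Int.mod n 7 = 0 then PySem.List.pyRepeat ['8'] (PySem.Int.floordiv n 7)
  else if PySem.Int.mod n 7 = 1 then ['1', '0'] ++ PySem.List.pyRepeat ['8'] (PySem.Int.floordiv n 7 - 1)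
  else if PySem.Int.mod n 7 = 2 then ['1'] ++ PySem.List.pyRepeat ['8'] (PySem.Int.floordiv n 7)
  else if PySem.Int.mod n 7 = 3 then
    if n = 3 then ['7']
    else if n = 10 then ['2', '2']
    else ['2', '0', '0'] ++ PySem.List.pyRepeat ['8'] (PySem.Int.floordiv n 7 - 2)
  else if PySem.Int.mod n 7 = 4 then
    if n = 4 then ['4'] else ['2', '0'] ++ PySem.List.pyRepeat ['8'] (PySem.Int.floordiv n 7 - 1)
  else if PySem.Int.mod n 7 = 5 then ['2'] ++ PySem.List.pyRepeat ['8'] (PySem.Int.floordiv n 7)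
  else ['6'] ++ PySem.List.pyRepeat ['8'] (PySem.Int.floordiv n 7)

def find_min_case_dp_alt (n : Int) : String := String.ofList (altChars n)

-- ===== PRECONDITION & SPEC =====
-- A raises IndexError for every n < 0 (dp[0] = "" on a too-short list); Pre_ excludes exactly those.
def Pre_find_min_case_dp (n : Int) : Prop := 0 ≤ n
instance (n : Int) : Decidable (Pre_find_min_case_dp n) := by unfold Pre_find_min_case_dp; infer_instance
def pvWitness_find_min_case_dp : Int := 9

def Spec_find_min_case_dp (n : Int) (out : String) : Prop := out = find_min_case_dp_alt n
instance (n : Int) (out : String) : Decidable (Spec_find_min_case_dp n out) := by unfold Spec_find_min_case_dp; infer_instance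

-- ===== CLAIM (what is proved, stated in full; the proofs are below) =====
def Claim_equal_find_min_case_dp : Prop := ∀ (n : Int), Dom_find_min_case_dp n → Pre_find_min_case_dp n → Spec_find_min_case_dp n (find_min_case_dp n)

-- ===== LEMMAS AND PROOFS =====

theorem repNat (a b : Nat) (h : a = b + 1) :
    List.replicate a '8' = List.replicate b '8' ++ ['8'] := by
  rw [h, List.replicate_succ']

theorem pvAlt_step (j : Int) (hj : 11 ≤ j) : altChars (j + 7) = altChars j ++ ['8'] := by
  obtain ⟨q, r, hq, hr0, hr7, hfd, hmd⟩ :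
      ∃ q r, q * 7 + r = j ∧ 0 ≤ r ∧ r < 7 ∧
        PySem.Int.floordiv j 7 = q ∧ PySem.Int.mod j 7 = r :=
    ⟨_, _, PySem.Int.floordiv_mul_add_mod j 7,
      PySem.Int.mod_nonneg j (by norm_num), PySem.Int.mod_lt j (by norm_num), rfl, rfl⟩
  have hq7 : PySem.Int.floordiv (j + 7) 7 = q + 1 := by
    rw [PySem.Int.floordiv_eq_iff_of_pos (by norm_num)]; omega
  have hr7' : PySem.Int.mod (j + 7) 7 = r := by
    have := PySem.Int.floordiv_mul_add_mod (j + 7) 7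
    rw [hq7] at this; omega
  unfold altChars
  simp only [hq7, hr7', hfd, hmd, PySem.List.pyRepeat_singleton]
  have hr : r = 0 ∨ r = 1 ∨ r = 2 ∨ r = 3 ∨ r = 4 ∨ r = 5 ∨ r = 6 := by omega
  have hq1 : 1 ≤ q := by omega
  rcases hr with h|h|h|h|h|h|h <;> subst h <;>
      rw [if_neg (show ¬(j+7=0) by omega), if_neg (show ¬(j+7=1) by omega),
          if_neg (show ¬(j=0) by omega), if_neg (show ¬(j=1) by omega)]
  · rw [if_pos rfl, if_pos rfl]
    exact repNat _ _ (by omega)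
  · norm_num
    exact repNat _ _ (by omega)
  · norm_num
    exact repNat _ _ (by omega)
  · norm_num
    rw [if_neg (show ¬(j+7=3) by omega), if_neg (show ¬(j+7=10) by omega),
        if_neg (show ¬(j=3) by omega), if_neg (show ¬(j=10) by omega)]
    first
    | exact repNat _ _ (by omega)
    | exact congrArg (fun t => '2' :: '0' :: '0' :: t) (repNat _ _ (by omega))
  · norm_num
    rw [if_neg (show ¬(j+7=4) by omega), if_neg (show ¬(j=4) by omega)]
    first
    | exact repNat _ _ (by omega)
    | exact congrArg (fun t => '2' :: '0' :: t) (repNat _ _ (by omega))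
  · norm_num
    exact repNat _ _ (by omega)
  · norm_num
    exact repNat _ _ (by omega)


def stepV (i : Int) (read : Int → List Char) (v : List Char) (p : Int × Int) : List Char :=
  if 0 ≤ i - p.2 then
    if p.1 = 0 ∧ read (i - p.2) = [] then v
    else if read (i - p.2) ≠ pvINF then
      if v = pvINF ∨ pvIntLt (read (i - p.2) ++ PySem.Int.toChars p.1) v = true then
        read (i - p.2) ++ PySem.Int.toChars p.1
      else v
    else v
  else v

theorem pvDV_append_one (w : List Char) (d : Char) :
    pvDigitsVal (w ++ [d]) = 10 * pvDigitsVal w + ((d.toNat : Int) - 48) := by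
  simp [pvDigitsVal, List.foldl_append]

theorem pvDV_append_two (w : List Char) (d : Char) :
    pvDigitsVal (w ++ ['8', d]) = 100 * pvDigitsVal w + 80 + ((d.toNat : Int) - 48) := by
  simp [pvDigitsVal, List.foldl_append]; ring

theorem pvIntLt_ins (a b : List Char) (x y : Char)
    (hx1 : 48 ≤ x.toNat) (hx2 : x.toNat ≤ 57) (hy1 : 48 ≤ y.toNat) (hy2 : y.toNat ≤ 57) :
    pvIntLt (a ++ ['8', x]) (b ++ ['8', y]) = pvIntLt (a ++ [x]) (b ++ [y]) := by
  simp only [pvIntLt, pvDV_append_two, pvDV_append_one]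
  apply decide_eq_decide.mpr
  omega

theorem pvNe_inf_of_digit_last (w : List Char) (d : Char) (hd : d.toNat ≤ 57) :
    w ++ [d] ≠ pvINF := by
  intro h
  have h1 : (w ++ [d]).getLast? = pvINF.getLast? := by rw [h]
  simp [pvINF] at h1
  subst h1
  simp at hd

def pvShape (v : List Char) : Prop :=
  v = pvINF ∨ ∃ w d, 48 ≤ d.toNat ∧ d.toNat ≤ 57 ∧ v = w ++ [d]

def pvIns8 (xs : List Char) : List Char := xs.dropLast ++ '8' :: xs.drop (xs.length - 1)

theorem pvIns8_append (w : List Char) (d : Char) : pvIns8 (w ++ [d]) = w ++ ['8', d] := by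
  simp [pvIns8]

def pvLift (v : List Char) : List Char := if v = pvINF then pvINF else pvIns8 v

theorem pvAlt_ends8 (j : Int) (hj : 18 ≤ j) : ∃ w, altChars j = w ++ ['8'] := by
  have h := pvAlt_step (j - 7) (by omega)
  refine ⟨altChars (j - 7), ?_⟩
  have e : j - 7 + 7 = j := by ring
  rw [e] at h
  exact h

theorem pvAlt_shape (j : Int) (hj : 11 ≤ j) :
    ∃ w d, 48 ≤ d.toNat ∧ d.toNat ≤ 57 ∧ altChars j = w ++ [d] := by
  by_cases h : j ≤ 17
  · interval_cases j
    · exact ⟨['2'], '0', by decide, by decide, by decide⟩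
    · exact ⟨['2'], '8', by decide, by decide, by decide⟩
    · exact ⟨['6'], '8', by decide, by decide, by decide⟩
    · exact ⟨['8'], '8', by decide, by decide, by decide⟩
    · exact ⟨['1', '0'], '8', by decide, by decide, by decide⟩
    · exact ⟨['1', '8'], '8', by decide, by decide, by decide⟩
    · exact ⟨['2', '0'], '0', by decide, by decide, by decide⟩
  · obtain ⟨w, hw⟩ := pvAlt_ends8 j (by omega)
    exact ⟨w, '8', by decide, by decide, hw⟩

theorem pvStep_lift (i : Int) (hi : 18 ≤ i) (num c : Int) (d : Char)
    (hd : PySem.Int.toChars num = [d]) (hd1 : 48 ≤ d.toNat) (hd2 : d.toNat ≤ 57)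
    (hc1 : 2 ≤ c) (hc2 : c ≤ 7) (v : List Char) (hv : pvShape v) :
    stepV (i + 7) altChars (pvLift v) (num, c) = pvLift (stepV i altChars v (num, c)) ∧
      pvShape (stepV i altChars v (num, c)) := by
  have hic : 11 ≤ i - c := by omega
  have hstep : altChars (i + 7 - c) = altChars (i - c) ++ ['8'] := by
    have h := pvAlt_step (i - c) hic
    have e : i - c + 7 = i + 7 - c := by ring
    rw [e] at h
    exact h
  obtain ⟨w0, d0, hd01, hd02, hw0⟩ := pvAlt_shape (i - c) hic
  have hpne : altChars (i - c) ≠ [] := by rw [hw0]; simp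
  have hpni : altChars (i - c) ≠ pvINF := by rw [hw0]; exact pvNe_inf_of_digit_last _ _ hd02
  have hp8ne : altChars (i + 7 - c) ≠ [] := by rw [hstep]; simp
  have hp8ni : altChars (i + 7 - c) ≠ pvINF := by
    rw [hstep]; exact pvNe_inf_of_digit_last _ _ (by decide)
  have hcandni : altChars (i - c) ++ PySem.Int.toChars num ≠ pvINF := by
    rw [hd]; exact pvNe_inf_of_digit_last _ _ hd2
  have hcand8 : altChars (i + 7 - c) ++ PySem.Int.toChars num
      = altChars (i - c) ++ ['8', d] := by
    rw [hstep, hd, List.append_assoc]; rfl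
  rcases hv with hv | ⟨w, d2, hw1, hw2, hw⟩
  · subst hv
    have hlift : pvLift pvINF = pvINF := by simp [pvLift]
    rw [hlift]
    unfold stepV
    simp only
    rw [if_pos (show 0 ≤ i + 7 - c by omega), if_pos (show 0 ≤ i - c by omega),
        if_neg (show ¬(num = 0 ∧ altChars (i + 7 - c) = []) from fun h => hp8ne h.2),
        if_neg (show ¬(num = 0 ∧ altChars (i - c) = []) from fun h => hpne h.2),
        if_pos hp8ni, if_pos hpni]
    simp only [true_or, if_true]
    constructor
    · rw [hcand8, pvLift, if_neg hcandni, hd, pvIns8_append]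
    · exact Or.inr ⟨altChars (i - c), d, hd1, hd2, by rw [hd]⟩
  · have hvni : v ≠ pvINF := by rw [hw]; exact pvNe_inf_of_digit_last _ _ hw2
    have hliftv : pvLift v = w ++ ['8', d2] := by rw [pvLift, if_neg hvni, hw, pvIns8_append]
    have hlvni : pvLift v ≠ pvINF := by
      rw [hliftv, show w ++ ['8', d2] = (w ++ ['8']) ++ [d2] by simp]
      exact pvNe_inf_of_digit_last _ _ hw2
    have hcmp : pvIntLt (altChars (i + 7 - c) ++ PySem.Int.toChars num) (pvLift v)
        = pvIntLt (altChars (i - c) ++ PySem.Int.toChars num) v := by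
      rw [hcand8, hliftv, hd, hw]
      exact pvIntLt_ins _ _ _ _ hd1 hd2 hw1 hw2
    unfold stepV
    simp only
    rw [if_pos (show 0 ≤ i + 7 - c by omega), if_pos (show 0 ≤ i - c by omega),
        if_neg (show ¬(num = 0 ∧ altChars (i + 7 - c) = []) from fun h => hp8ne h.2),
        if_neg (show ¬(num = 0 ∧ altChars (i - c) = []) from fun h => hpne h.2),
        if_pos hp8ni, if_pos hpni]
    by_cases hb : pvIntLt (altChars (i - c) ++ PySem.Int.toChars num) v = true
    · rw [if_pos (Or.inr (hcmp.trans hb)), if_pos (Or.inr hb)]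
      constructor
      · rw [hcand8, pvLift, if_neg hcandni, hd, pvIns8_append]
      · exact Or.inr ⟨altChars (i - c), d, hd1, hd2, by rw [hd]⟩
    · rw [if_neg (show ¬(pvLift v = pvINF ∨ _) from ?_), if_neg (show ¬(v = pvINF ∨ _) from ?_)]
      · exact ⟨rfl, Or.inr ⟨w, d2, hw1, hw2, hw⟩⟩
      · rintro (h | h)
        · exact hvni h
        · exact hb h
      · rintro (h | h)
        · exact hlvni h
        · exact hb (hcmp ▸ h)

def pvPairs : List (Int × Int) := [(0, 6), (1, 2), (2, 5), (3, 5), (4, 4), (5, 5), (6, 6), (7, 3), (8, 7), (9, 6)]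

theorem pvPairs_data : ∀ p ∈ pvPairs,
    (∃ d, PySem.Int.toChars p.1 = [d] ∧ 48 ≤ d.toNat ∧ d.toNat ≤ 57) ∧ 2 ≤ p.2 ∧ p.2 ≤ 7 := by
  intro p hp
  fin_cases hp
  · exact ⟨⟨'0', by decide, by decide, by decide⟩, by norm_num, by norm_num⟩
  · exact ⟨⟨'1', by decide, by decide, by decide⟩, by norm_num, by norm_num⟩
  · exact ⟨⟨'2', by decide, by decide, by decide⟩, by norm_num, by norm_num⟩
  · exact ⟨⟨'3', by decide, by decide, by decide⟩, by norm_num, by norm_num⟩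
  · exact ⟨⟨'4', by decide, by decide, by decide⟩, by norm_num, by norm_num⟩
  · exact ⟨⟨'5', by decide, by decide, by decide⟩, by norm_num, by norm_num⟩
  · exact ⟨⟨'6', by decide, by decide, by decide⟩, by norm_num, by norm_num⟩
  · exact ⟨⟨'7', by decide, by decide, by decide⟩, by norm_num, by norm_num⟩
  · exact ⟨⟨'8', by decide, by decide, by decide⟩, by norm_num, by norm_num⟩
  · exact ⟨⟨'9', by decide, by decide, by decide⟩, by norm_num, by norm_num⟩

theorem pvFold_lift (i : Int) (hi : 18 ≤ i) :
    ∀ (ps : List (Int × Int)), (∀ p ∈ ps, p ∈ pvPairs) → ∀ (v : List Char), pvShape v →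
      ps.foldl (stepV (i + 7) altChars) (pvLift v) = pvLift (ps.foldl (stepV i altChars) v) := by
  intro ps
  induction ps with
  | nil => intro _ v _; rfl
  | cons p ps ih =>
    intro hps v hv
    obtain ⟨num, c⟩ := p
    obtain ⟨⟨d, hd, hd1, hd2⟩, hc1, hc2⟩ := pvPairs_data _ (hps _ List.mem_cons_self)
    obtain ⟨heq, hshape⟩ := pvStep_lift i hi num c d hd hd1 hd2 hc1 hc2 v hv
    simp only [List.foldl_cons]
    rw [heq]
    exact ih (fun q hq => hps q (List.mem_cons_of_mem _ hq)) _ hshape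

theorem pvInner_eq_aux : ∀ (k : Nat), ∀ (i : Int), i ≤ (k : Int) → 2 ≤ i →
    pvPairs.foldl (stepV i altChars) pvINF = altChars i := by
  intro k
  induction k with
  | zero => intro i h1 h2; omega
  | succ k ih =>
    intro i h1 h2
    by_cases h : i ≤ 24
    · interval_cases i <;> decide
    · have ih7 := ih (i - 7) (by push_cast at h1 ⊢; omega) (by omega)
      have hf := pvFold_lift (i - 7) (by omega) pvPairs (fun p hp => hp) pvINF (Or.inl rfl)
      rw [show pvLift pvINF = pvINF from by simp [pvLift]] at hf
      have e : i - 7 + 7 = i := by ring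
      rw [e] at hf
      rw [hf, ih7]
      obtain ⟨w, hw⟩ := pvAlt_ends8 (i - 7) (by omega)
      have hni : altChars (i - 7) ≠ pvINF := by
        rw [hw]; exact pvNe_inf_of_digit_last _ _ (by decide)
      have hst := pvAlt_step (i - 7) (by omega)
      rw [e] at hst
      rw [pvLift, if_neg hni, hw, pvIns8_append, hst, hw]
      simp

theorem pvInner_eq (i : Int) (hi : 2 ≤ i) :
    pvPairs.foldl (stepV i altChars) pvINF = altChars i :=
  pvInner_eq_aux i.toNat i (by omega) hi

theorem pvStepA_set (i : Int) (dp : List (List Char)) (h0 : 0 ≤ i)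
    (hlen : i < (dp.length : Int)) (p : Int × Int) (hp2 : 1 ≤ p.2) (v : List Char) :
    stepA i (PySem.List.pySetD dp i v) p =
      PySem.List.pySetD dp i (stepV i (fun j => PySem.List.pyGetD dp j []) v p) := by
  have hset : PySem.List.pySetD dp i v = dp.set i.toNat v := PySem.List.pySetD_of_nonneg dp v h0
  unfold stepA stepV
  by_cases hg : 0 ≤ i - p.2
  · have hr1 : PySem.List.pyGetD (PySem.List.pySetD dp i v) (i - p.2) []
        = PySem.List.pyGetD dp (i - p.2) [] := by
      rw [hset, PySem.List.pyGetD_of_nonneg _ _ hg, PySem.List.pyGetD_of_nonneg _ _ hg]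
      simp only [List.getD]
      rw [List.getElem?_set_ne (by omega)]
    have hri : PySem.List.pyGetD (PySem.List.pySetD dp i v) i [] = v := by
      rw [hset, PySem.List.pyGetD_of_nonneg _ _ h0]
      simp only [List.getD]
      rw [List.getElem?_set_self (by omega)]
      rfl
    have hw : ∀ w, PySem.List.pySetD (PySem.List.pySetD dp i v) i w = PySem.List.pySetD dp i w := by
      intro w
      rw [hset, PySem.List.pySetD_of_nonneg _ _ h0, PySem.List.pySetD_of_nonneg _ _ h0,
        List.set_set]
    rw [if_pos hg, if_pos hg, hr1, hri]
    by_cases h1 : p.1 = 0 ∧ PySem.List.pyGetD dp (i - p.2) [] = []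
    · rw [if_pos h1, if_pos h1]
    · rw [if_neg h1, if_neg h1]
      by_cases h2 : PySem.List.pyGetD dp (i - p.2) [] ≠ pvINF
      · rw [if_pos h2, if_pos h2]
        by_cases h3 : v = pvINF ∨
            pvIntLt (PySem.List.pyGetD dp (i - p.2) [] ++ PySem.Int.toChars p.1) v = true
        · rw [if_pos h3, if_pos h3, hw]
        · rw [if_neg h3, if_neg h3]
      · rw [if_neg h2, if_neg h2]
  · rw [if_neg hg, if_neg hg]

theorem pvInnerA_aux (i : Int) (dp : List (List Char)) (h0 : 0 ≤ i)
    (hlen : i < (dp.length : Int)) :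
    ∀ (ps : List (Int × Int)), (∀ p ∈ ps, p ∈ pvPairs) → ∀ (v : List Char),
      ps.foldl (stepA i) (PySem.List.pySetD dp i v) =
        PySem.List.pySetD dp i
          (ps.foldl (stepV i (fun j => PySem.List.pyGetD dp j [])) v) := by
  intro ps
  induction ps with
  | nil => intro _ v; rfl
  | cons p ps ih =>
    intro hps v
    have hp2 : 1 ≤ p.2 := by
      have := (pvPairs_data _ (hps _ List.mem_cons_self)).2.1
      omega
    simp only [List.foldl_cons]
    rw [pvStepA_set i dp h0 hlen p hp2 v]
    exact ih (fun q hq => hps q (List.mem_cons_of_mem _ hq)) _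

theorem pvInnerA (i : Int) (dp : List (List Char)) (h0 : 0 ≤ i)
    (hlen : i < (dp.length : Int)) :
    pvPairs.foldl (stepA i) dp =
      PySem.List.pySetD dp i
        (pvPairs.foldl (stepV i (fun j => PySem.List.pyGetD dp j []))
          (PySem.List.pyGetD dp i [])) := by
  have hself : dp = PySem.List.pySetD dp i (PySem.List.pyGetD dp i []) := by
    rw [PySem.List.pySetD_of_nonneg _ _ h0, PySem.List.pyGetD_eq_getElem _ _ h0 hlen,
      List.set_getElem_self]
  calc pvPairs.foldl (stepA i) dp
      = pvPairs.foldl (stepA i) (PySem.List.pySetD dp i (PySem.List.pyGetD dp i [])) := by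
        rw [← hself]
    _ = _ := pvInnerA_aux i dp h0 hlen pvPairs (fun p hp => hp) _

def pvModel (n k : Int) : List (List Char) :=
  (PySem.List.pyRange 0 (n + 1) 1).map (fun j => if j ≤ k then altChars j else pvINF)

theorem pvModel_len (n k : Int) : (pvModel n k).length = (n + 1 - 0).toNat := by
  simp [pvModel, PySem.List.length_pyRange_one]

theorem pvModel_get (n k j : Int) (h0 : 0 ≤ j) (hj : j < n + 1) :
    PySem.List.pyGetD (pvModel n k) j [] = if j ≤ k then altChars j else pvINF :=
  PySem.List.pyGetD_map_pyRange_of_nonneg _ _ _ _ h0 hj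

theorem pvModel_init (n : Int) (_hn : 0 ≤ n) :
    PySem.List.pySetD (PySem.List.pyRepeat [pvINF] (n + 1)) 0 [] = pvModel n 1 := by
  rw [PySem.List.pyRepeat_singleton, PySem.List.pySetD_of_nonneg _ _ le_rfl]
  apply List.ext_getElem
  · simp [pvModel, PySem.List.length_pyRange_one]
  · intro k h1 h2
    simp only [List.getElem_set, List.getElem_replicate, pvModel, List.getElem_map,
      PySem.List.getElem_pyRange_one, Int.toNat_zero, zero_add]
    by_cases hk0 : k = 0
    · subst hk0
      rw [if_pos rfl, if_pos (by norm_num)]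
      decide
    · rw [if_neg (by omega)]
      by_cases hk1 : k = 1
      · subst hk1
        rw [if_pos (by norm_num)]
        decide
      · rw [if_neg (by omega)]

theorem pvModel_set (n i : Int) (h0 : 0 ≤ i) (_hn : i ≤ n) :
    PySem.List.pySetD (pvModel n (i - 1)) i (altChars i) = pvModel n i := by
  rw [PySem.List.pySetD_of_nonneg _ _ h0]
  apply List.ext_getElem
  · simp [pvModel, PySem.List.length_pyRange_one]
  · intro k h1 h2
    simp only [List.getElem_set, pvModel, List.getElem_map,
      PySem.List.getElem_pyRange_one, zero_add]
    by_cases hk : i.toNat = k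
    · rw [if_pos hk, if_pos (by omega)]
      have : (k : Int) = i := by omega
      rw [this]
    · rw [if_neg hk]
      by_cases hle : (k : Int) ≤ i - 1
      · rw [if_pos hle, if_pos (by omega)]
      · rw [if_neg hle, if_neg (by omega)]

theorem pvModel_step (n i : Int) (h2 : 2 ≤ i) (hn : i ≤ n) :
    pvPairs.foldl (stepA i) (pvModel n (i - 1)) = pvModel n i := by
  have hlen : i < ((pvModel n (i - 1)).length : Int) := by
    rw [pvModel_len]; omega
  rw [pvInnerA i _ (by omega) hlen]
  rw [pvModel_get n (i - 1) i (by omega) (by omega), if_neg (by omega)]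
  have hsw : pvPairs.foldl (stepV i (fun j => PySem.List.pyGetD (pvModel n (i - 1)) j [])) pvINF
      = pvPairs.foldl (stepV i altChars) pvINF := by
    apply PySem.List.foldl_congr_mem
    intro v p hp
    have hp2 := (pvPairs_data p hp).2
    unfold stepV
    beta_reduce
    by_cases hg : 0 ≤ i - p.2
    · rw [if_pos hg, if_pos hg,
        pvModel_get n (i - 1) (i - p.2) hg (by omega), if_pos (show i - p.2 ≤ i - 1 by omega)]
    · rw [if_neg hg, if_neg hg]
  rw [hsw, pvInner_eq i h2, pvModel_set n i (by omega) hn]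

theorem pvOuter (n : Int) (_hn : 0 ≤ n) : ∀ (k : Int), 1 ≤ k → k ≤ n →
    (PySem.List.pyRange 2 (k + 1) 1).foldl (fun dp i => pvPairs.foldl (stepA i) dp)
        (pvModel n 1) = pvModel n k := by
  intro k hk
  induction k, hk using Int.le_induction with
  | base =>
    intro _
    rw [show (1 : Int) + 1 = 2 from rfl, PySem.List.pyRange_one_eq_nil (le_refl 2)]
    rfl
  | succ k hk1 ih =>
    intro hkn
    rw [PySem.List.pyRange_one_succ_right (show (2 : Int) ≤ k + 1 by omega), List.foldl_append,
      ih (by omega)]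
    simp only [List.foldl_cons, List.foldl_nil]
    have := pvModel_step n (k + 1) (by omega) hkn
    rw [show k + 1 - 1 = k by ring] at this
    exact this

theorem pvItems_eq_pvPairs : PySem.Dict.items matchsticks = pvPairs := by decide

-- ===== VERDICT (by name: the statement is the Claim_ definition above) =====
theorem find_min_case_dp_spec : Claim_equal_find_min_case_dp := by
  intro n _ hpre
  unfold Spec_find_min_case_dp
  have h0 : (0 : Int) ≤ n := hpre
  by_cases h1 : n ≤ 1
  · interval_cases n
    · decide
    · decide
  · unfold find_min_case_dp
    simp only [pvItems_eq_pvPairs]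
    rw [pvModel_init n (by omega), pvOuter n (by omega) n (by omega) (le_refl n),
      pvModel_get n n n (by omega) (by omega), if_pos (le_refl n)]
    rfl
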